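-- pv_equiv track=rewrite | github.com/arindhimar/BluePineapple | Python Programs/28-01-26/270.py | sum_of_even_numbers_at_even_positions
-- ===== SOURCE A (Python) =====
-- def sum_of_even_numbers_at_even_positions(n):
--     if n < 1:
--         raise ValueError("Input must be a positive integer")
--
--     temp_sum = 0
--     for i in range(n):
--         even_number = 2 * i
--         temp_sum += even_number
--
--     return temp_sum
-- ===== SOURCE B (Python) =====
-- def sum_of_even_numbers_at_even_positions(n):
--     if n < 1:
--         raise ValueError("Input must be a positive integer")
--     return n * (n - 1)
-- ===== Notes on version B (the rewrite author's own statement) =====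
-- stated objective: faster
-- what changed: Replaced the O(n) accumulation loop over range(n) by the closed-form formula n*(n-1) = sum of 2*i for i in 0..n-1.
import Mathlib
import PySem

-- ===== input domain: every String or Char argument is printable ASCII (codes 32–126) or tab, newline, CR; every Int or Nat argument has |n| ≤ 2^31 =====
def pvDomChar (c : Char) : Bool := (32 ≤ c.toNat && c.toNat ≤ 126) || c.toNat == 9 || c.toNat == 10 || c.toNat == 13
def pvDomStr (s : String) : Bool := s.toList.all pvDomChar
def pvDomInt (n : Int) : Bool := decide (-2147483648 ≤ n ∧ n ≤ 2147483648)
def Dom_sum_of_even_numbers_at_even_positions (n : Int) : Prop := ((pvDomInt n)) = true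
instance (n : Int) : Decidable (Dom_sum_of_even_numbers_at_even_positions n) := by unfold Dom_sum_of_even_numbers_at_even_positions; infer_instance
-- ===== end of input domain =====

-- ===== PORT A =====
-- Loop over range(n) accumulating 2*i, transliterated as a foldl over pyRange.
def sum_of_even_numbers_at_even_positions (n : Int) : Int :=
  (PySem.List.pyRange 0 n 1).foldl (fun temp_sum i => temp_sum + 2 * i) 0

-- ===== PORT B =====
-- B: closed-form formula n*(n-1).
def sum_of_even_numbers_at_even_positions_alt (n : Int) : Int :=
  n * (n - 1)

-- ===== PRECONDITION & SPEC =====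
-- A raises ValueError for n < 1; Pre_ excludes exactly those inputs.
def Pre_sum_of_even_numbers_at_even_positions (n : Int) : Prop := 1 ≤ n
instance (n : Int) : Decidable (Pre_sum_of_even_numbers_at_even_positions n) := by unfold Pre_sum_of_even_numbers_at_even_positions; infer_instance
def pvWitness_sum_of_even_numbers_at_even_positions : Int := 3
def Spec_sum_of_even_numbers_at_even_positions (n : Int) (out : Int) : Prop := out = sum_of_even_numbers_at_even_positions_alt n
instance (n : Int) (out : Int) : Decidable (Spec_sum_of_even_numbers_at_even_positions n out) := by unfold Spec_sum_of_even_numbers_at_even_positions; infer_instance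

-- ===== CLAIM =====
def Claim_equal_sum_of_even_numbers_at_even_positions : Prop := ∀ (n : Int), Dom_sum_of_even_numbers_at_even_positions n → Pre_sum_of_even_numbers_at_even_positions n → Spec_sum_of_even_numbers_at_even_positions n (sum_of_even_numbers_at_even_positions n)

-- ===== LEMMAS AND PROOFS =====
theorem pv_fold_range (m : Nat) :
    ((List.range m).map (fun k : Nat => (0 : Int) + (k : Int))).foldl (fun temp_sum i => temp_sum + 2 * i) 0
      = (m : Int) * ((m : Int) - 1) := by
  induction m with
  | zero => simp
  | succ m ih =>
    rw [List.range_succ, List.map_append, List.foldl_append, ih]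
    simp
    ring

-- ===== VERDICT =====
theorem sum_of_even_numbers_at_even_positions_spec : Claim_equal_sum_of_even_numbers_at_even_positions := by
  intro n _ hn
  unfold Pre_sum_of_even_numbers_at_even_positions at hn
  unfold Spec_sum_of_even_numbers_at_even_positions sum_of_even_numbers_at_even_positions sum_of_even_numbers_at_even_positions_alt
  rw [PySem.List.pyRange_one]
  have h := pv_fold_range (n - 0).toNat
  rw [h]
  have : ((n - 0).toNat : Int) = n := by omega
  rw [this]
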